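-- pv_equiv track=rewrite | github.com/GLA-Python/surprise-test-puneetshukla146 | q.1.py | accordian
-- ===== SOURCE A (Python) =====
-- def accordian(l):
--         try:
--             diff= abs(l[1]-l[0])
--             if abs(l[2]-l[1])>diff:
--                 flag = True
--             else:
--                 flag = False
--         except IndexError:
--             return True
--
--         for i in range(2,len(l)):
--             if flag and  abs(l[i]-l[i-1])>diff:
--                       diff=abs(l[i]-l[i-1])
--                       flag = not flag
--             elif not flag and abs(l[i]-l[i-1])<diff:
--                       diff=abs(l[i]-l[i-1])
--                       flag= not flag
--
--             else:
--                       return False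
--
--         return True
-- ===== SOURCE B (Python) =====
-- def accordian(l):
--     if len(l) < 3:
--         return True
--     # Stateless local characterization: the adjacent absolute differences must
--     # strictly alternate, which holds iff every second-order delta is nonzero
--     # and every pair of consecutive second-order deltas has a negative product.
--     diffs = [abs(x - y) for x, y in zip(l[1:], l)]
--     deltas = [b - a for a, b in zip(diffs, diffs[1:])]
--     return all(d != 0 for d in deltas) and all(x * y < 0 for x, y in zip(deltas, deltas[1:]))
-- ===== Notes on version B (the rewrite author's own statement) =====
-- stated objective: simpler
-- what changed: B drops A's mutable (diff, flag) direction state machine entirely: it checks the stateless local property that every second-order delta of the absolute-difference table is nonzero and consecutive second-order deltas have a negative product.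
import Mathlib
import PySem

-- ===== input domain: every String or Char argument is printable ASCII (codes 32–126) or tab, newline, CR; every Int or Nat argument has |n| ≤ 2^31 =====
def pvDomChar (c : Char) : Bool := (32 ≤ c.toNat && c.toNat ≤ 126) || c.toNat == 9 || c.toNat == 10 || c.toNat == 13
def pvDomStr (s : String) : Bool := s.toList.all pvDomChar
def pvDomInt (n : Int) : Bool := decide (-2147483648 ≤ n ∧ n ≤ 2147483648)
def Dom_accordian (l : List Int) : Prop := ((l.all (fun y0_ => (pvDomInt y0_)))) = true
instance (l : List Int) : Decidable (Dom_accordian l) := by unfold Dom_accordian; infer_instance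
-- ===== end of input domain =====

-- B replaces A's stateful (diff, flag) direction machine by a stateless local test:
-- every second-order delta of the |difference| table is nonzero and consecutive
-- second-order deltas have a negative product (objective: simpler).

-- ===== PORT A =====
-- the 'for i in range(2, len(l))' loop: state (diff, flag)
def accordianLoop (l : List Int) : List Int → Int → Bool → Bool
  | [], _, _ => true
  | i :: rest, diff, flag =>
    if flag && decide (|PySem.List.pyGetD l i 0 - PySem.List.pyGetD l (i - 1) 0| > diff) then
      accordianLoop l rest |PySem.List.pyGetD l i 0 - PySem.List.pyGetD l (i - 1) 0| (!flag)
    else if (!flag) && decide (|PySem.List.pyGetD l i 0 - PySem.List.pyGetD l (i - 1) 0| < diff) then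
      accordianLoop l rest |PySem.List.pyGetD l i 0 - PySem.List.pyGetD l (i - 1) 0| (!flag)
    else
      false

def accordian (l : List Int) : Bool :=
  match PySem.List.pyGet? l 1, PySem.List.pyGet? l 0 with
  | some a, some b =>
    let diff := |a - b|
    match PySem.List.pyGet? l 2 with
    | some c =>
      accordianLoop l (PySem.List.pyRange 2 l.length 1) diff (decide (|c - a| > diff))
    | none => true
  | _, _ => true

-- ===== PORT B =====
def accordian_alt (l : List Int) : Bool :=
  if l.length < 3 then true
  else
    let diffs := ((l.drop 1).zip l).map (fun p => |p.1 - p.2|)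
    let deltas := (diffs.zip (diffs.drop 1)).map (fun p => p.2 - p.1)
    deltas.all (fun d => decide (d ≠ 0)) &&
      (deltas.zip (deltas.drop 1)).all (fun p => decide (p.1 * p.2 < 0))

-- ===== PRECONDITION & SPEC =====
def Spec_accordian (l : List Int) (out : Bool) : Prop := out = accordian_alt l
instance (l : List Int) (out : Bool) : Decidable (Spec_accordian l out) := by unfold Spec_accordian; infer_instance

-- ===== CLAIM (what is proved, stated in full; the proofs are below) =====
def Claim_equal_accordian : Prop := ∀ (l : List Int), Dom_accordian l → Spec_accordian l (accordian l)

-- ===== LEMMAS AND PROOFS =====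

-- value-level pipeline of B (definitionally equal to the lets in accordian_alt)
def pvDiffs (xs : List Int) : List Int := ((xs.drop 1).zip xs).map (fun p => |p.1 - p.2|)
def pvDeltas (ds : List Int) : List Int := (ds.zip (ds.drop 1)).map (fun p => p.2 - p.1)
def pvAllNZ (ds : List Int) : Bool := ds.all (fun d => decide (d ≠ 0))
def pvAllNeg (ds : List Int) : Bool := (ds.zip (ds.drop 1)).all (fun p => decide (p.1 * p.2 < 0))

-- A's loop, re-expressed over the suffix of l's values (prev diff, expectation flag)
def altPairs : Int → Bool → List Int → Bool
  | prev, flag, x :: y :: rest =>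
    if (if flag then decide (|y - x| > prev) else decide (|y - x| < prev)) then
      altPairs |y - x| (!flag) (y :: rest)
    else false
  | _, _, _ => true

theorem pvAllNeg_cons (p q : Int) (rest : List Int) :
    pvAllNeg (p :: q :: rest) = (decide (p * q < 0) && pvAllNeg (q :: rest)) := rfl

-- A's pyRange loop computes altPairs over the value suffix
theorem accordian_loop_altPairs (l : List Int) :
    ∀ (m : Nat) (j diff : Int) (flag : Bool), 2 ≤ j → ((l.length : Int) - j).toNat = m →
      accordianLoop l (PySem.List.pyRange j l.length 1) diff flag
        = altPairs diff flag (l.drop (j - 1).toNat) := by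
  intro m
  induction m with
  | zero =>
    intro j diff flag h2 hm
    have hle : (l.length : Int) ≤ j := by omega
    rw [PySem.List.pyRange_one_eq_nil hle]
    have hlen : (l.drop (j - 1).toNat).length ≤ 1 := by
      rw [List.length_drop]; omega
    rcases hd : l.drop (j - 1).toNat with _ | ⟨x, _ | ⟨y, r⟩⟩
    · rfl
    · rfl
    · rw [hd] at hlen; simp at hlen
  | succ m ih =>
    intro j diff flag h2 hm
    have hlt : j < (l.length : Int) := by omega
    have hj1 : (j - 1).toNat < l.length := by omega
    have hj0 : j.toNat < l.length := by omega
    rw [PySem.List.pyRange_one_cons hlt]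
    have hd1 : l.drop (j - 1).toNat = l[(j - 1).toNat] :: l.drop ((j - 1).toNat + 1) :=
      List.drop_eq_getElem_cons hj1
    have hstep : (j - 1).toNat + 1 = j.toNat := by omega
    have hd0 : l.drop j.toNat = l[j.toNat] :: l.drop (j.toNat + 1) :=
      List.drop_eq_getElem_cons hj0
    have hg0 : PySem.List.pyGetD l j 0 = l[j.toNat] :=
      PySem.List.pyGetD_eq_getElem (xs := l) (i := j) (d := 0) (by omega) (by omega)
    have hg1 : PySem.List.pyGetD l (j - 1) 0 = l[(j - 1).toNat] :=
      PySem.List.pyGetD_eq_getElem (xs := l) (i := j - 1) (d := 0) (by omega) (by omega)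
    have hrec := ih (j + 1) |l[j.toNat] - l[(j - 1).toNat]| (!flag) (by omega) (by omega)
    have hj2 : (j + 1 - 1).toNat = j.toNat := by omega
    rw [hj2] at hrec
    rw [hd1, hstep, hd0]
    simp only [accordianLoop, altPairs, hg0, hg1]
    rw [← hd0, ← hrec]
    cases flag with
    | true =>
      by_cases hc : |l[j.toNat] - l[(j - 1).toNat]| > diff
      · simp
      · simp
    | false =>
      by_cases hc : |l[j.toNat] - l[(j - 1).toNat]| < diff
      · simp
      · simp


-- flag-specialised unfoldings of altPairs
theorem altPairs_true (prev x y : Int) (rest : List Int) :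
    altPairs prev true (x :: y :: rest)
      = if |y - x| > prev then altPairs |y - x| false (y :: rest) else false := by
  simp [altPairs]

theorem altPairs_false (prev x y : Int) (rest : List Int) :
    altPairs prev false (x :: y :: rest)
      = if |y - x| < prev then altPairs |y - x| true (y :: rest) else false := by
  simp [altPairs]

-- core equivalence: the direction machine = the local sign test, past the seeding step
theorem altPairs_eq_local :
    ∀ (xs : List Int) (y p prevd : Int), p ≠ 0 →
      altPairs prevd (decide (p ≤ 0)) (y :: xs)
        = (pvAllNZ (pvDeltas (prevd :: pvDiffs (y :: xs)))
            && pvAllNeg (p :: pvDeltas (prevd :: pvDiffs (y :: xs)))) := by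
  intro xs
  induction xs with
  | nil => intro y p prevd hp; rfl
  | cons z xs' ih =>
    intro y p prevd hp
    have hdiffs : pvDiffs (y :: z :: xs') = |z - y| :: pvDiffs (z :: xs') := rfl
    have hdel : pvDeltas (prevd :: |z - y| :: pvDiffs (z :: xs'))
        = (|z - y| - prevd) :: pvDeltas (|z - y| :: pvDiffs (z :: xs')) := rfl
    rw [hdiffs, hdel, pvAllNeg_cons]
    rcases lt_or_gt_of_ne hp with hneg | hpos
    · have hfl : decide (p ≤ 0) = true := by simp [hneg.le]
      rw [hfl, altPairs_true]
      by_cases hq : |z - y| > prevd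
      · have hq0 : |z - y| - prevd ≠ 0 := by omega
        have hpq : p * (|z - y| - prevd) < 0 := mul_neg_of_neg_of_pos hneg (by omega)
        have hdq : decide ((|z - y| - prevd) ≤ 0) = false := by
          simp only [decide_eq_false_iff_not]; omega
        have hih := ih z (|z - y| - prevd) (|z - y|) hq0
        rw [hdq] at hih
        rw [if_pos hq, hih]
        simp only [pvAllNZ, List.all_cons]
        simp [hpq, hq0]
      · have hnpq : ¬ p * (|z - y| - prevd) < 0 := by
          intro hcon
          have : 0 < |z - y| - prevd := by nlinarith
          omega
        rw [if_neg hq]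
        simp [hnpq]
    · have hfl : decide (p ≤ 0) = false := by
        simp only [decide_eq_false_iff_not]; omega
      rw [hfl, altPairs_false]
      by_cases hq : |z - y| < prevd
      · have hq0 : |z - y| - prevd ≠ 0 := by omega
        have hpq : p * (|z - y| - prevd) < 0 := mul_neg_of_pos_of_neg hpos (by omega)
        have hdq : decide ((|z - y| - prevd) ≤ 0) = true := by
          simp only [decide_eq_true_eq]; omega
        have hih := ih z (|z - y| - prevd) (|z - y|) hq0
        rw [hdq] at hih
        rw [if_pos hq, hih]
        simp only [pvAllNZ, List.all_cons]
        simp [hpq, hq0]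
      · have hnpq : ¬ p * (|z - y| - prevd) < 0 := by
          intro hcon
          have : |z - y| - prevd < 0 := by nlinarith
          omega
        rw [if_neg hq]
        simp [hnpq]

-- ===== VERDICT =====
theorem accordian_spec : Claim_equal_accordian := by
  intro l _
  unfold Spec_accordian
  rcases l with _ | ⟨a, _ | ⟨b, _ | ⟨c, t⟩⟩⟩
  · rfl
  · rfl
  · simp [accordian, accordian_alt, PySem.List.pyGet?, PySem.List.pyIdx?]
  · set l := a :: b :: c :: t with hl
    have hlen : 3 ≤ l.length := by simp [hl]
    have h1 : PySem.List.pyGet? l 1 = some b := by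
      rw [PySem.List.pyGet?_of_nonneg (xs := l) (i := 1) (by norm_num), hl]; rfl
    have h0 : PySem.List.pyGet? l 0 = some a := by
      rw [PySem.List.pyGet?_of_nonneg (xs := l) (i := 0) (by norm_num), hl]; rfl
    have h2 : PySem.List.pyGet? l 2 = some c := by
      rw [PySem.List.pyGet?_of_nonneg (xs := l) (i := 2) (by norm_num), hl]; rfl
    set d0 := |b - a| with hd0
    set d1 := |c - b| with hd1
    have hA : accordian l = accordianLoop l (PySem.List.pyRange 2 l.length 1) d0
        (decide (d1 > d0)) := by
      unfold accordian; rw [h1, h0, h2]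
    rw [hA, accordian_loop_altPairs l ((l.length : Int) - 2).toNat 2 d0 _ (by omega) rfl]
    have hdrop : l.drop ((2 : Int) - 1).toNat = b :: c :: t := by rw [hl]; rfl
    rw [hdrop]
    -- B side restated through the value pipeline
    have hB : accordian_alt l
        = (pvAllNZ (pvDeltas (pvDiffs l)) && pvAllNeg (pvDeltas (pvDiffs l))) := by
      unfold accordian_alt
      rw [if_neg (by omega)]
      rfl
    rw [hB]
    have hDl : pvDiffs l = d0 :: d1 :: pvDiffs (c :: t) := by rw [hl]; rfl
    set p0 := d1 - d0 with hp0
    have hDel : pvDeltas (d0 :: d1 :: pvDiffs (c :: t))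
        = p0 :: pvDeltas (d1 :: pvDiffs (c :: t)) := rfl
    rw [hDl, hDel]
    by_cases hp : p0 = 0
    · -- d1 = d0 : both sides false
      have hf : decide (d1 > d0) = false := by
        simp only [decide_eq_false_iff_not]; omega
      have hL : altPairs d0 (decide (d1 > d0)) (b :: c :: t) = false := by
        rw [hf, altPairs_false, ← hd1, if_neg (by omega)]
      rw [hL]
      simp [pvAllNZ, hp]
    · -- seeding step, then the core lemma
      have hL : altPairs d0 (decide (d1 > d0)) (b :: c :: t)
          = altPairs d1 (decide (p0 ≤ 0)) (c :: t) := by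
        by_cases hgt : d1 > d0
        · have hf : decide (d1 > d0) = true := by simp [hgt]
          have hf2 : decide (p0 ≤ 0) = false := by
            simp only [decide_eq_false_iff_not]; omega
          rw [hf, altPairs_true, ← hd1, if_pos hgt, hf2]
        · have hlt2 : d1 < d0 := by omega
          have hf : decide (d1 > d0) = false := by
            simp only [decide_eq_false_iff_not]; omega
          have hf2 : decide (p0 ≤ 0) = true := by
            simp only [decide_eq_true_eq]; omega
          rw [hf, altPairs_false, ← hd1, if_pos hlt2, hf2]
      rw [hL, altPairs_eq_local t c p0 d1 hp]
      simp only [pvAllNZ, List.all_cons]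
      simp [hp]
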